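-- pv_equiv track=rewrite | github.com/risangkwalikito-rgb/Rekonsiliasi-Tiket-Cabang | app.py | _ticket_header_score
-- ===== SOURCE A (Python) =====
-- import unicodedata
-- from typing import Callable, List, Optional, Tuple
--
-- def _norm_str(val) -> str:
--     s = "" if val is None else str(val)
--     s = unicodedata.normalize("NFKD", s)
--     s = "".join(ch for ch in s if not unicodedata.combining(ch))
--     return s.strip().lower()
--
-- def _ticket_header_markers() -> Tuple[str, ...]:
--     return (
--         "created",
--         "action date",
--         "action",
--         "tarif",
--         "bank",
--         "st bayar",
--         "status bayar",
--         "order id",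
--         "type",
--         "payment type",
--         "payment channel",
--         "channel",
--     )
--
-- def _ticket_header_score(values) -> int:
--     markers = _ticket_header_markers()
--     norm_vals = [_norm_str(v) for v in values if str(v).strip()]
--     score = 0
--     for marker in markers:
--         if any(marker in v for v in norm_vals):
--             score += 1
--     return score
-- ===== SOURCE B (Python) =====
-- import unicodedata
-- from typing import Tuple
--
-- def _norm_str(val) -> str:
--     s = "" if val is None else str(val)
--     s = unicodedata.normalize("NFKD", s)
--     s = "".join(ch for ch in s if not unicodedata.combining(ch))
--     return s.strip().lower()
--
-- def _ticket_header_markers() -> Tuple[str, ...]: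
--     return (
--         "created",
--         "action date",
--         "action",
--         "tarif",
--         "bank",
--         "st bayar",
--         "status bayar",
--         "order id",
--         "type",
--         "payment type",
--         "payment channel",
--         "channel",
--     )
--
-- def _ticket_header_score(values) -> int:
--     # Multi-pattern matching by substring enumeration: instead of testing each
--     # marker against each value, enumerate the candidate substrings of each
--     # normalized value (only at the markers' lengths) and look them up in a
--     # hash set of the markers; count the distinct markers found.
--     markers = _ticket_header_markers()
--     marker_set = set(markers)
--     lengths = sorted({len(m) for m in markers})
--     norm_vals = [_norm_str(v) for v in values if str(v).strip()]
--     matched = set()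
--     for v in norm_vals:
--         for i in range(len(v)):
--             for L in lengths:
--                 sub = v[i:i + L]
--                 if sub in marker_set:
--                     matched.add(sub)
--     return len(matched)
-- ===== Notes on version B (the rewrite author's own statement) =====
-- stated objective: alternative
-- what changed: Replaces A's per-marker substring scans with multi-pattern matching by substring enumeration: B enumerates each normalized value's substrings at the markers' distinct lengths, looks each up in a hash set of the markers, and returns the number of distinct markers found.
import Mathlib
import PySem

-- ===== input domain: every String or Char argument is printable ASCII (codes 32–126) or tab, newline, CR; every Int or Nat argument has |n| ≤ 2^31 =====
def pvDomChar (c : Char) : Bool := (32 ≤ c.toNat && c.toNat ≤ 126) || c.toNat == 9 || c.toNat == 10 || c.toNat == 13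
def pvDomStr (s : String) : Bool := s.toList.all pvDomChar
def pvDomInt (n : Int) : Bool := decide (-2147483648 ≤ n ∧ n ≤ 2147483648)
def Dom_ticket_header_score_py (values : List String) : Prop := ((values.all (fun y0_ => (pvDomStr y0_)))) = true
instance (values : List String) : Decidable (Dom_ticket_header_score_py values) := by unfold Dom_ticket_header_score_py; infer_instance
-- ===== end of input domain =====

-- ===== PORT A =====
-- B replaces A's per-marker substring tests with multi-pattern matching by substring
-- enumeration: it enumerates each value's substrings at the markers' lengths and looks
-- them up in a hash set of markers, counting the distinct markers found (objective:
-- alternative algorithm, same observable result).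
-- _norm_str: on the printable-ASCII domain NFKD normalization is the identity and no
-- character is combining, so it is exactly strip-then-lower.
def pvNormA (v : String) : String := PySem.Str.lower (PySem.Str.strip v)

def pvMarkersA : List String :=
  ["created", "action date", "action", "tarif", "bank", "st bayar", "status bayar",
   "order id", "type", "payment type", "payment channel", "channel"]

def ticket_header_score_py (values : List String) : Int :=
  let norm_vals := (values.filter (fun v => !(PySem.Str.strip v == ""))).map pvNormA
  pvMarkersA.foldl
    (fun score marker =>
      if norm_vals.any (fun v => PySem.Str.isIn marker v) then score + 1 else score) 0

-- ===== PORT B =====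
def pvNormB (v : String) : String := PySem.Str.lower (PySem.Str.strip v)

def pvMarkersB : List String :=
  ["created", "action date", "action", "tarif", "bank", "st bayar", "status bayar",
   "order id", "type", "payment type", "payment channel", "channel"]

-- marker_set = set(markers)
def pvMarkerSetB : PySem.Set String := PySem.Set.ofList pvMarkersB

-- lengths = sorted({len(m) for m in markers})
def pvLengthsB : List Int :=
  PySem.List.sorted (PySem.Set.ofList (pvMarkersB.map PySem.Str.len)) (fun x => x) false

def ticket_header_score_py_alt (values : List String) : Int :=
  let norm_vals := (values.filter (fun v => !(PySem.Str.strip v == ""))).map pvNormB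
  let matched : PySem.Set String :=
    norm_vals.foldl
      (fun m v =>
        (PySem.List.pyRange 0 (PySem.Str.len v) 1).foldl
          (fun m i =>
            pvLengthsB.foldl
              (fun m L =>
                let sub := PySem.Str.slice v (some i) (some (i + L))
                if PySem.Set.contains pvMarkerSetB sub then PySem.Set.add m sub else m) m) m)
      PySem.Set.empty
  PySem.Set.len matched

-- ===== PRECONDITION & SPEC =====
def Spec_ticket_header_score_py (values : List String) (out : Int) : Prop := out = ticket_header_score_py_alt values
instance (values : List String) (out : Int) : Decidable (Spec_ticket_header_score_py values out) := by unfold Spec_ticket_header_score_py; infer_instance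

-- ===== CLAIM (what is proved, stated in full; the proofs are below) =====
def Claim_equal_ticket_header_score_py : Prop := ∀ (values : List String), Dom_ticket_header_score_py values → Spec_ticket_header_score_py values (ticket_header_score_py values)

-- ===== LEMMAS AND PROOFS =====

-- facts about the concrete marker table, decided once
lemma markers_facts : ∀ y ∈ pvMarkersB, y.toList ≠ [] ∧ PySem.Str.len y ∈ pvLengthsB := by decide

lemma lengths_pos : ∀ L ∈ pvLengthsB, 1 ≤ L := by decide

-- membership in B's innermost fold over the candidate lengths
lemma mem_len_fold (Ls : List Int) (v : String) (i : Int) (s : PySem.Set String) (y : String) :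
    y ∈ Ls.foldl (fun m L =>
        let sub := PySem.Str.slice v (some i) (some (i + L))
        if PySem.Set.contains pvMarkerSetB sub then PySem.Set.add m sub else m) s ↔
      y ∈ s ∨ (y ∈ pvMarkersB ∧ ∃ L ∈ Ls, PySem.Str.slice v (some i) (some (i + L)) = y) := by
  induction Ls generalizing s with
  | nil => simp
  | cons L t ih =>
    simp only [List.foldl_cons, ih]
    by_cases h : PySem.Set.contains pvMarkerSetB (PySem.Str.slice v (some i) (some (i + L))) = true
    · simp only [h, if_pos, PySem.Set.mem_add]
      constructor
      · rintro (⟨hy | rfl⟩ | ⟨hm, L', hL', hv⟩)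
        · exact Or.inl hy
        · refine Or.inr ⟨?_, L, List.mem_cons_self .., rfl⟩
          have := (PySem.Set.contains_iff _ _).mp h
          simpa [pvMarkerSetB, PySem.Set.mem_ofList] using this
        · exact Or.inr ⟨hm, L', List.mem_cons_of_mem _ hL', hv⟩
      · rintro (hy | ⟨hm, L', hL', hv⟩)
        · exact Or.inl (Or.inl hy)
        · rcases List.mem_cons.mp hL' with rfl | hL'
          · exact Or.inl (Or.inr hv.symm)
          · exact Or.inr ⟨hm, L', hL', hv⟩
    · simp only [h, if_neg, Bool.not_eq_true]
      constructor
      · rintro (hy | ⟨hm, L', hL', hv⟩)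
        · exact Or.inl hy
        · exact Or.inr ⟨hm, L', List.mem_cons_of_mem _ hL', hv⟩
      · rintro (hy | ⟨hm, L', hL', hv⟩)
        · exact Or.inl hy
        · rcases List.mem_cons.mp hL' with rfl | hL'
          · exfalso
            apply h
            rw [hv, PySem.Set.contains_iff]
            simpa [pvMarkerSetB, PySem.Set.mem_ofList] using hm
          · exact Or.inr ⟨hm, L', hL', hv⟩

lemma nodup_len_fold (Ls : List Int) (v : String) (i : Int) (s : PySem.Set String)
    (hs : s.Nodup) :
    (Ls.foldl (fun m L =>
        let sub := PySem.Str.slice v (some i) (some (i + L))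
        if PySem.Set.contains pvMarkerSetB sub then PySem.Set.add m sub else m) s).Nodup := by
  induction Ls generalizing s with
  | nil => exact hs
  | cons L t ih =>
    simp only [List.foldl_cons]
    split
    · exact ih _ (PySem.Set.nodup_add _ _ hs)
    · exact ih _ hs

-- membership in the fold over the start indices (any index list)
lemma mem_idx_fold (idxs : List Int) (v : String) (s : PySem.Set String) (y : String) :
    y ∈ idxs.foldl (fun m i =>
        pvLengthsB.foldl (fun m L =>
          let sub := PySem.Str.slice v (some i) (some (i + L))
          if PySem.Set.contains pvMarkerSetB sub then PySem.Set.add m sub else m) m) s ↔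
      y ∈ s ∨ (y ∈ pvMarkersB ∧ ∃ i ∈ idxs, ∃ L ∈ pvLengthsB,
        PySem.Str.slice v (some i) (some (i + L)) = y) := by
  induction idxs generalizing s with
  | nil => simp
  | cons i t ih =>
    simp only [List.foldl_cons, ih, mem_len_fold, List.mem_cons]
    constructor
    · rintro ((hy | ⟨hm, L, hL, hv⟩) | ⟨hm, i', hi', L, hL, hv⟩)
      · exact Or.inl hy
      · exact Or.inr ⟨hm, i, Or.inl rfl, L, hL, hv⟩
      · exact Or.inr ⟨hm, i', Or.inr hi', L, hL, hv⟩
    · rintro (hy | ⟨hm, i', (rfl | hi'), L, hL, hv⟩)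
      · exact Or.inl (Or.inl hy)
      · exact Or.inl (Or.inr ⟨hm, L, hL, hv⟩)
      · exact Or.inr ⟨hm, i', hi', L, hL, hv⟩

lemma nodup_idx_fold (idxs : List Int) (v : String) (s : PySem.Set String) (hs : s.Nodup) :
    (idxs.foldl (fun m i =>
        pvLengthsB.foldl (fun m L =>
          let sub := PySem.Str.slice v (some i) (some (i + L))
          if PySem.Set.contains pvMarkerSetB sub then PySem.Set.add m sub else m) m) s).Nodup := by
  induction idxs generalizing s with
  | nil => exact hs
  | cons i t ih => exact ih _ (nodup_len_fold _ _ _ _ hs)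

-- substring enumeration finds y in v iff y is a substring of v, for y a marker
lemma enum_iff_isIn (v y : String) (hy : y.toList ≠ [])
    (hlen : PySem.Str.len y ∈ pvLengthsB) :
    (∃ i ∈ PySem.List.pyRange 0 (PySem.Str.len v) 1, ∃ L ∈ pvLengthsB,
        PySem.Str.slice v (some i) (some (i + L)) = y) ↔ PySem.Str.isIn y v = true := by
  constructor
  · rintro ⟨i, hi, L, hL, hv⟩
    rcases PySem.List.mem_pyRange_one.mp hi with ⟨hi0, _⟩
    have hL1 := lengths_pos L hL
    have hlist : y.toList = List.take ((i + L).toNat - i.toNat) (List.drop i.toNat v.toList) := by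
      rw [← hv, PySem.Str.toList_slice, PySem.Chars.slice_eq_listSlice,
        PySem.List.slice_toNat _ hi0 (by omega)]
    rw [PySem.Str.isIn_iff_infix]
    have hpre : y.toList <+: List.drop i.toNat v.toList := by
      rw [hlist]; exact List.take_prefix _ _
    have := (PySem.Chars.exists_prefix_drop_iff_isIn _ _).mp ⟨_, hpre⟩
    exact (PySem.Chars.isIn_iff_infix _ _).mp this
  · intro h
    have hinf := (PySem.Str.isIn_iff_infix _ _).mp h
    obtain ⟨j, hpre⟩ := (PySem.Chars.exists_prefix_drop_iff_isIn _ _).mpr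
      ((PySem.Chars.isIn_iff_infix _ _).mpr hinf)
    have hjlt : j < v.toList.length := by
      by_contra hge
      rw [List.drop_eq_nil_of_le (by omega)] at hpre
      exact hy (List.prefix_nil.mp hpre)
    refine ⟨(j : Int), ?_, PySem.Str.len y, hlen, ?_⟩
    · rw [PySem.List.mem_pyRange_one, PySem.Str.len_eq]
      constructor
      · positivity
      · exact_mod_cast hjlt
    · have htake := List.prefix_iff_eq_take.mp hpre
      rw [← String.toList_inj, PySem.Str.toList_slice, PySem.Chars.slice_eq_listSlice,
        PySem.Str.len_eq]
      rw [PySem.List.slice_natCast_add]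
      exact htake.symm

-- ===== VERDICT (by name: the statement is the Claim_ definition above) =====
theorem ticket_header_score_py_spec : Claim_equal_ticket_header_score_py := by
  intro values _
  unfold Spec_ticket_header_score_py ticket_header_score_py ticket_header_score_py_alt
  simp only []
  set nv := (values.filter (fun v => !(PySem.Str.strip v == ""))).map pvNormA with hnv
  have hnvB : (values.filter (fun v => !(PySem.Str.strip v == ""))).map pvNormB = nv := rfl
  rw [hnvB]
  set p : String → Bool := fun marker => nv.any (fun v => PySem.Str.isIn marker v) with hp
  rw [PySem.List.foldl_count_if p pvMarkersA 0, zero_add]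
  -- characterize membership in B's matched set via the outer fold over nv
  have mem_outer : ∀ (vs : List String) (s : PySem.Set String) (y : String),
      y ∈ vs.foldl (fun m v =>
          (PySem.List.pyRange 0 (PySem.Str.len v) 1).foldl (fun m i =>
            pvLengthsB.foldl (fun m L =>
              let sub := PySem.Str.slice v (some i) (some (i + L))
              if PySem.Set.contains pvMarkerSetB sub then PySem.Set.add m sub else m) m) m) s ↔
        y ∈ s ∨ (y ∈ pvMarkersB ∧ ∃ v ∈ vs, ∃ i ∈ PySem.List.pyRange 0 (PySem.Str.len v) 1,
          ∃ L ∈ pvLengthsB, PySem.Str.slice v (some i) (some (i + L)) = y) := by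
    intro vs
    induction vs with
    | nil => simp
    | cons v t ih =>
      intro s y
      simp only [List.foldl_cons, ih, mem_idx_fold, List.mem_cons]
      constructor
      · rintro ((hy | ⟨hm, rest⟩) | ⟨hm, w, hw, rest⟩)
        · exact Or.inl hy
        · exact Or.inr ⟨hm, v, Or.inl rfl, rest⟩
        · exact Or.inr ⟨hm, w, Or.inr hw, rest⟩
      · rintro (hy | ⟨hm, w, (rfl | hw), rest⟩)
        · exact Or.inl (Or.inl hy)
        · exact Or.inl (Or.inr ⟨hm, rest⟩)
        · exact Or.inr ⟨hm, w, hw, rest⟩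
  have nodup_outer : ∀ (vs : List String) (s : PySem.Set String), s.Nodup →
      (vs.foldl (fun m v =>
          (PySem.List.pyRange 0 (PySem.Str.len v) 1).foldl (fun m i =>
            pvLengthsB.foldl (fun m L =>
              let sub := PySem.Str.slice v (some i) (some (i + L))
              if PySem.Set.contains pvMarkerSetB sub then PySem.Set.add m sub else m) m) m) s).Nodup := by
    intro vs
    induction vs with
    | nil => exact fun s hs => hs
    | cons v t ih => exact fun s hs => ih _ (nodup_idx_fold _ _ _ hs)
  -- B's matched set is a permutation of pvMarkersA.filter p
  have hperm : (nv.foldl (fun m v =>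
      (PySem.List.pyRange 0 (PySem.Str.len v) 1).foldl (fun m i =>
        pvLengthsB.foldl (fun m L =>
          let sub := PySem.Str.slice v (some i) (some (i + L))
          if PySem.Set.contains pvMarkerSetB sub then PySem.Set.add m sub else m) m) m)
      PySem.Set.empty).Perm (pvMarkersA.filter p) := by
    rw [List.perm_ext_iff_of_nodup (nodup_outer _ PySem.Set.empty (by simp [PySem.Set.empty]))
      (List.Nodup.filter p (by decide : pvMarkersA.Nodup))]
    intro y
    rw [mem_outer, List.mem_filter]
    simp only [PySem.Set.empty, List.not_mem_nil, false_or, hp, List.any_eq_true]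
    constructor
    · rintro ⟨hm, w, hw, hocc⟩
      obtain ⟨hne, hlen⟩ := markers_facts y hm
      exact ⟨hm, w, hw, (enum_iff_isIn w y hne hlen).mp hocc⟩
    · rintro ⟨hm, w, hw, hin⟩
      obtain ⟨hne, hlen⟩ := markers_facts y hm
      exact ⟨hm, w, hw, (enum_iff_isIn w y hne hlen).mpr hin⟩
  have hlen := hperm.length_eq
  rw [List.countP_eq_length_filter]
  simp only [PySem.Set.len, hlen]
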